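-- pv_equiv track=rewrite | github.com/paul-tong/informaitonRetrieval | 3-index/proximityQuery.py | inWindow
-- ===== SOURCE A (Python) =====
-- def inWindow(positions1, positions2, k):
--     # decode position list from distance to actual positions
--     for i in range(1, len(positions1)):
--         positions1[i] += positions1[i - 1]
--
--     for i in range(1, len(positions2)):
--         positions2[i] += positions2[i - 1]
--
--     for position in positions1:
--         # for each position in positions1, get the closest position in positions2
--         # return true if distance <= k + 1
--         closest = min(positions2, key=lambda x:abs(x-position))
--         distance = abs(position - closest)
--         if distance <= k + 1:
--             return True;
--
--     return False;
-- ===== SOURCE B (Python) =====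
-- def inWindow(positions1, positions2, k):
--     # Decode gap lists to absolute positions (without mutating the arguments,
--     # unlike the original, which decodes in place), sort both, then a single
--     # two-pointer merge decides whether any pair lies within k + 1.
--     def decode(gaps):
--         out = []
--         total = 0
--         for g in gaps:
--             total += g
--             out.append(total)
--         return out
--
--     a = sorted(decode(positions1))
--     b = sorted(decode(positions2))
--     t = k + 1
--     i = j = 0
--     while i < len(a) and j < len(b):
--         if abs(a[i] - b[j]) <= t:
--             return True
--         if a[i] < b[j]:
--             i += 1
--         else:
--             j += 1
--     return False
-- ===== Notes on version B (the rewrite author's own statement) =====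
-- stated objective: alternative
-- what changed: Instead of scanning all of positions2 per element of positions1 (min with an abs key), B decodes both gap lists by a running sum, sorts both, and decides existence of a close pair with one two-pointer merge; it trades A's per-element min scans for sorting plus a single merge.
import Mathlib
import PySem

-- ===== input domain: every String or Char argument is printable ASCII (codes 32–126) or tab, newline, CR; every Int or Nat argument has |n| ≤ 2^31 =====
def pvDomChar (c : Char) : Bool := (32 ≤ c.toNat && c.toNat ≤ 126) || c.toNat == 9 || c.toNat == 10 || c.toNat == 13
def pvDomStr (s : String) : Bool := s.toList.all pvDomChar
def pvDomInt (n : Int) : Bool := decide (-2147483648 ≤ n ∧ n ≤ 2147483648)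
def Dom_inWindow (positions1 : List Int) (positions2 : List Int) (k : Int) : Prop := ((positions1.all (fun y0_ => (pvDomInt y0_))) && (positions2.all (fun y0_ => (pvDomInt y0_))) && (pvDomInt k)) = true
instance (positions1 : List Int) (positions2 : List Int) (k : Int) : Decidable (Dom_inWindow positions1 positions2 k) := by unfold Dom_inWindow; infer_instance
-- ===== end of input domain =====

-- B decides the same question by sort + two-pointer merge instead of a per-element
-- min scan; A decodes its list arguments in place, B does not mutate them — the
-- equivalence proved here is about the return value only.

-- ===== PORT A =====
-- for i in range(1, len(l)): l[i] += l[i-1]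
def decodeA (l : List Int) : List Int :=
  (PySem.List.pyRange 1 l.length 1).foldl
    (fun xs i => PySem.List.pySetD xs i (PySem.List.pyGetD xs i 0 + PySem.List.pyGetD xs (i - 1) 0)) l

-- the early-return loop over positions1 (min? = none exactly where Python's min raises)
def scanA (p1 p2 : List Int) (k : Int) : Bool :=
  match p1 with
  | [] => false
  | p :: rest =>
    match PySem.List.min? p2 (fun x => |x - p|) with
    | none => false
    | some closest => if |p - closest| ≤ k + 1 then true else scanA rest p2 k

def inWindow (positions1 : List Int) (positions2 : List Int) (k : Int) : Bool :=
  scanA (decodeA positions1) (decodeA positions2) k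

-- ===== PORT B =====
-- running-sum decode (pure)
def decodeB (gaps : List Int) : List Int :=
  ((gaps.foldl (fun (st : List Int × Int) g => (st.1 ++ [st.2 + g], st.2 + g)) ([], 0))).1

-- the two-pointer while loop, as recursion on the two sorted lists
-- (the fuel only makes the recursion structural; a.length + b.length steps always suffice)
def twoPtrF (fuel : Nat) (a b : List Int) (t : Int) : Bool :=
  match fuel, a, b with
  | fuel + 1, x :: xs, y :: ys =>
      if |x - y| ≤ t then true
      else if x < y then twoPtrF fuel xs (y :: ys) t
      else twoPtrF fuel (x :: xs) ys t
  | _, _, _ => false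

def twoPtr (a b : List Int) (t : Int) : Bool := twoPtrF (a.length + b.length) a b t

def inWindow_alt (positions1 : List Int) (positions2 : List Int) (k : Int) : Bool :=
  twoPtr (PySem.List.sorted (decodeB positions1) (fun x => x) false)
         (PySem.List.sorted (decodeB positions2) (fun x => x) false) (k + 1)

-- ===== PRECONDITION & SPEC =====
-- Pre_ excludes exactly the inputs where A raises: on a non-empty positions1 with an
-- empty positions2 A calls min([]) and raises ValueError (B returns False there).
def Pre_inWindow (positions1 : List Int) (positions2 : List Int) (k : Int) : Prop :=
  positions1 = [] ∨ positions2 ≠ []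
instance (positions1 : List Int) (positions2 : List Int) (k : Int) : Decidable (Pre_inWindow positions1 positions2 k) := by unfold Pre_inWindow; infer_instance

def pvWitness_inWindow : List Int × List Int × Int := ([1, 2], [1], 0)

def Spec_inWindow (positions1 : List Int) (positions2 : List Int) (k : Int) (out : Bool) : Prop := out = inWindow_alt positions1 positions2 k
instance (positions1 : List Int) (positions2 : List Int) (k : Int) (out : Bool) : Decidable (Spec_inWindow positions1 positions2 k out) := by unfold Spec_inWindow; infer_instance

-- ===== CLAIM (what is proved, stated in full; the proofs are below) =====
def Claim_equal_inWindow : Prop := ∀ (positions1 : List Int) (positions2 : List Int) (k : Int), Dom_inWindow positions1 positions2 k → Pre_inWindow positions1 positions2 k → Spec_inWindow positions1 positions2 k (inWindow positions1 positions2 k)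

-- ===== LEMMAS AND PROOFS =====

-- the common value of both decoders: running prefix sums from accumulator t
def scanSum (gaps : List Int) (t : Int) : List Int :=
  match gaps with
  | [] => []
  | g :: gs => (t + g) :: scanSum gs (t + g)

theorem scanSum_length (xs : List Int) (t : Int) : (scanSum xs t).length = xs.length := by
  induction xs generalizing t with
  | nil => rfl
  | cons g gs ih => simp [scanSum, ih]

theorem scanSum_append (xs ys : List Int) (t : Int) :
    scanSum (xs ++ ys) t = scanSum xs t ++ scanSum ys (t + xs.sum) := by
  induction xs generalizing t with
  | nil => simp [scanSum]
  | cons g gs ih => simp [scanSum, ih, add_assoc]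

theorem scanSum_getLast? (xs : List Int) (t : Int) (h : xs ≠ []) :
    (scanSum xs t).getLast? = some (t + xs.sum) := by
  induction xs generalizing t with
  | nil => simp at h
  | cons g gs ih =>
    cases gs with
    | nil => simp [scanSum]
    | cons g2 gs2 =>
      rw [show scanSum (g :: g2 :: gs2) t = (t + g) :: ((t + g) + g2) :: scanSum gs2 ((t + g) + g2) from rfl,
          List.getLast?_cons_cons,
          show ((t + g) + g2) :: scanSum gs2 ((t + g) + g2) = scanSum (g2 :: gs2) (t + g) from rfl,
          ih (t + g) (by simp)]
      simp [add_assoc]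

theorem decodeB_aux (l : List Int) (acc : List Int) (t : Int) :
    (l.foldl (fun (st : List Int × Int) g => (st.1 ++ [st.2 + g], st.2 + g)) (acc, t)).1
      = acc ++ scanSum l t := by
  induction l generalizing acc t with
  | nil => simp [scanSum]
  | cons g gs ih => simp [List.foldl_cons, ih, scanSum]

theorem decodeB_eq (l : List Int) : decodeB l = scanSum l 0 := by
  simpa using decodeB_aux l [] 0

theorem decodeA_loop (post pre : List Int) (hpre : pre ≠ []) :
    (PySem.List.pyRange (pre.length : Int) ((pre.length : Int) + (post.length : Int)) 1).foldl
      (fun xs i => PySem.List.pySetD xs i (PySem.List.pyGetD xs i 0 + PySem.List.pyGetD xs (i - 1) 0))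
      (scanSum pre 0 ++ post)
      = scanSum (pre ++ post) 0 := by
  induction post generalizing pre with
  | nil => simp [PySem.List.pyRange_one_eq_nil]
  | cons x rest ih =>
    have hj1 : 1 ≤ pre.length := List.length_pos_iff.mpr hpre
    rw [PySem.List.pyRange_one_cons (by have : ((x :: rest).length : Int) = (rest.length : Int) + 1 := by simp
                                        omega), List.foldl_cons]
    have hsl : (scanSum pre 0).length = pre.length := scanSum_length pre 0
    have hget : PySem.List.pyGetD (scanSum pre 0 ++ x :: rest) (pre.length : Int) 0 = x := by
      simp [pysem, List.getD_eq_getElem?_getD, hsl]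
    have hcast : ((pre.length : Int) - 1) = ((pre.length - 1 : Nat) : Int) := by omega
    have hlt : pre.length - 1 < (scanSum pre 0).length := by rw [hsl]; omega
    have hget2 : PySem.List.pyGetD (scanSum pre 0 ++ x :: rest) ((pre.length : Int) - 1) 0 = pre.sum := by
      rw [hcast]
      simp only [pysem]
      rw [List.getD_eq_getElem?_getD, List.getElem?_append_left hlt,
          show pre.length - 1 = (scanSum pre 0).length - 1 from by omega,
          ← List.getLast?_eq_getElem?, scanSum_getLast? pre 0 hpre]
      simp
    have hset : PySem.List.pySetD (scanSum pre 0 ++ x :: rest) (pre.length : Int) (x + pre.sum)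
        = scanSum (pre ++ [x]) 0 ++ rest := by
      simp only [pysem, PySem.List.pySetD_natCast]
      rw [show (pre.length : Nat) = (scanSum pre 0).length + 0 from by omega,
          List.set_append_right _ _ (by omega), scanSum_append]
      simp [scanSum]
      ring
    rw [hget, hget2, hset]
    have hih := ih (pre ++ [x]) (by simp)
    rw [show ((pre ++ [x]).length : Int) = (pre.length : Int) + 1 from by simp,
        show ((pre.length : Int) + 1 + (rest.length : Int)) = (pre.length : Int) + ((x :: rest).length : Int) from by simp; ring,
        List.append_assoc, List.singleton_append] at hih
    exact hih

theorem decodeA_eq (l : List Int) : decodeA l = scanSum l 0 := by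
  cases l with
  | nil => simp [decodeA, PySem.List.pyRange_one_eq_nil, scanSum]
  | cons a rest =>
    have h := decodeA_loop rest [a] (by simp)
    have hs : scanSum [a] 0 = [a] := by simp [scanSum]
    rw [hs] at h
    unfold decodeA
    have e1 : (([a].length : Nat) : Int) = 1 := by simp
    rw [e1, List.singleton_append] at h
    have e : (((a :: rest).length : Nat) : Int) = 1 + (rest.length : Int) := by
      simp; omega
    rw [e]
    exact h

theorem scanA_eq (p1 p2 : List Int) (k : Int) (h2 : p2 ≠ []) :
    scanA p1 p2 k = p1.any (fun p => p2.any (fun q => |p - q| ≤ k + 1)) := by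
  induction p1 with
  | nil => rfl
  | cons p rest ih =>
    rw [scanA]
    cases hm : PySem.List.min? p2 (fun x => |x - p|) with
    | none => exact absurd ((PySem.List.min?_eq_none_iff _ _).mp hm) h2
    | some m =>
      have hmem := PySem.List.min?_mem hm
      have hmin := PySem.List.min?_isMin hm
      by_cases hc : |p - m| ≤ k + 1
      · simp only [hc, if_pos]
        have : (p2.any (fun q => |p - q| ≤ k + 1)) = true := by
          refine List.any_eq_true.mpr ⟨m, hmem, by simpa using hc⟩
        simp [List.any_cons, this]
      · simp only [hc, if_neg, not_false_iff]
        have hrow : (p2.any (fun q => |p - q| ≤ k + 1)) = false := by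
          refine List.any_eq_false.mpr ?_
          intro q hq
          simp only [decide_eq_true_eq]
          intro habs
          have h1 : |m - p| ≤ |q - p| := hmin q hq
          exact hc (by rw [abs_sub_comm]; exact le_trans h1 (by rwa [abs_sub_comm] at habs))
        simp [List.any_cons, hrow, ih]

theorem twoPtrF_iff (fuel : Nat) (a b : List Int) (t : Int)
    (hf : a.length + b.length ≤ fuel)
    (ha : a.Pairwise (· ≤ ·)) (hb : b.Pairwise (· ≤ ·)) :
    twoPtrF fuel a b t = true ↔ ∃ p ∈ a, ∃ q ∈ b, |p - q| ≤ t := by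
  induction fuel generalizing a b with
  | zero =>
    have ha0 : a = [] := by cases a <;> simp_all
    have hb0 : b = [] := by cases b <;> simp_all
    subst ha0; subst hb0; simp [twoPtrF]
  | succ n ih =>
    cases a with
    | nil => simp [twoPtrF]
    | cons x xs =>
      cases b with
      | nil => simp [twoPtrF]
      | cons y ys =>
        rw [twoPtrF]
        by_cases h1 : |x - y| ≤ t
        · rw [if_pos h1]
          exact iff_of_true rfl ⟨x, by simp, y, by simp, h1⟩
        · rw [if_neg h1]
          rcases List.pairwise_cons.mp ha with ⟨hxle, hxs⟩
          rcases List.pairwise_cons.mp hb with ⟨hyle, hys⟩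
          by_cases h2 : x < y
          · rw [if_pos h2]
            -- x matches nothing in y :: ys
            have hxno : ∀ q ∈ y :: ys, ¬ |x - q| ≤ t := by
              intro q hq
              have hyq : y ≤ q := by
                rcases hq with _ | hq'
                · exact le_rfl
                · exact hyle q (by assumption)
              have : t < y - x := by
                rcases abs_cases (x - y) with ⟨he, _⟩ | ⟨he, _⟩ <;> omega
              intro habs
              rcases abs_cases (x - q) with ⟨he, _⟩ | ⟨he, _⟩ <;> omega
            rw [ih xs (y :: ys) (by simp at hf ⊢; omega) hxs hb]
            constructor
            · rintro ⟨p, hp, q, hq, hpq⟩; exact ⟨p, List.mem_cons_of_mem x hp, q, hq, hpq⟩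
            · rintro ⟨p, hp, q, hq, hpq⟩
              rcases List.mem_cons.mp hp with rfl | hp'
              · exact absurd hpq (hxno q hq)
              · exact ⟨p, hp', q, hq, hpq⟩
          · rw [if_neg h2]
            -- y matches nothing in x :: xs
            have hyno : ∀ p ∈ x :: xs, ¬ |p - y| ≤ t := by
              intro p hp
              have hxp : x ≤ p := by
                rcases hp with _ | hp'
                · exact le_rfl
                · exact hxle p (by assumption)
              have hyx : y ≤ x := le_of_not_gt h2
              have : t < x - y := by
                rcases abs_cases (x - y) with ⟨he, _⟩ | ⟨he, _⟩ <;> omega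
              intro habs
              rcases abs_cases (p - y) with ⟨he, _⟩ | ⟨he, _⟩ <;> omega
            rw [ih (x :: xs) ys (by simp at hf ⊢; omega) ha hys]
            constructor
            · rintro ⟨p, hp, q, hq, hpq⟩; exact ⟨p, hp, q, List.mem_cons_of_mem y hq, hpq⟩
            · rintro ⟨p, hp, q, hq, hpq⟩
              rcases List.mem_cons.mp hq with rfl | hq'
              · exact absurd hpq (hyno p hp)
              · exact ⟨p, hp, q, hq', hpq⟩

-- ===== VERDICT (by name: the statement is the Claim_ definition above) =====
theorem twoPtrF_nil_left (fuel : Nat) (b : List Int) (t : Int) : twoPtrF fuel [] b t = false := by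
  cases fuel <;> rfl

theorem scanSum_ne_nil (l : List Int) (h : l ≠ []) : scanSum l 0 ≠ [] := by
  intro hc
  have := scanSum_length l 0
  rw [hc] at this
  exact h (List.length_eq_zero_iff.mp this.symm)

theorem inWindow_spec : Claim_equal_inWindow := by
  intro p1 p2 k _ hpre
  unfold Spec_inWindow inWindow inWindow_alt twoPtr
  rw [decodeA_eq, decodeA_eq, decodeB_eq, decodeB_eq]
  rcases hpre with h1 | h2
  · subst h1
    have hs : PySem.List.sorted (scanSum ([] : List Int) 0) (fun x => x) false = [] := by
      exact List.Perm.eq_nil (PySem.List.sorted_perm _ _ _)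
    rw [show scanSum ([] : List Int) 0 = [] from rfl] at hs ⊢
    rw [hs, scanA, twoPtrF_nil_left]
  · have hne : scanSum p2 0 ≠ [] := scanSum_ne_nil p2 h2
    rw [scanA_eq _ _ k hne]
    have hp1 : (PySem.List.sorted (scanSum p1 0) (fun x => x) false).Pairwise (· ≤ ·) := by
      simpa using PySem.List.sorted_pairwise (scanSum p1 0) (fun x => x)
    have hp2 : (PySem.List.sorted (scanSum p2 0) (fun x => x) false).Pairwise (· ≤ ·) := by
      simpa using PySem.List.sorted_pairwise (scanSum p2 0) (fun x => x)
    have hiff := twoPtrF_iff _ _ _ (k + 1) le_rfl hp1 hp2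
    rw [Bool.eq_iff_iff, List.any_eq_true, hiff]
    constructor
    · rintro ⟨p, hp, hrow⟩
      rcases List.any_eq_true.mp hrow with ⟨q, hq, hpq⟩
      exact ⟨p, (PySem.List.mem_sorted _ _ _ _).mpr hp, q, (PySem.List.mem_sorted _ _ _ _).mpr hq,
        by simpa using hpq⟩
    · rintro ⟨p, hp, q, hq, hpq⟩
      exact ⟨p, (PySem.List.mem_sorted _ _ _ _).mp hp,
        List.any_eq_true.mpr ⟨q, (PySem.List.mem_sorted _ _ _ _).mp hq, by simpa using hpq⟩⟩
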